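-- pv_equiv track=rewrite | github.com/MrBrantCode/unitest_baseline | mut_generate/mist_train_taco/taco_14390/solution.py | find_max_value_during_operations
-- ===== SOURCE A (Python) =====
-- def find_max_value_during_operations(N: int, S: str) -> int:
--     max_value = 0
--     x = 0
--     for char in S:
--         if char == 'I':
--             x += 1
--         else:
--             x -= 1
--         if max_value < x:
--             max_value = x
--     return max_value
-- ===== SOURCE B (Python) =====
-- def find_max_value_during_operations(N: int, S: str) -> int:
--     # Divide and conquer: for a segment return (floored max prefix sum, total sum).
--     # Merge rule: best prefix of L+R is either a prefix of L, or all of L plus a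
--     # prefix of R; totals add.
--     def solve(seg):
--         if not seg:
--             return (0, 0)
--         if len(seg) == 1:
--             d = 1 if seg == 'I' else -1
--             return (max(0, d), d)
--         mid = len(seg) // 2
--         mL, tL = solve(seg[:mid])
--         mR, tR = solve(seg[mid:])
--         return (max(mL, tL + mR), tL + tR)
--     return solve(S)[0]
-- ===== Notes on version B (the rewrite author's own statement) =====
-- stated objective: alternative
-- what changed: Replaces A's single left-to-right scan keeping a running sum and running max by a divide-and-conquer recursion that splits the string in half, returns (floored max prefix sum, total sum) per half and merges with (max(mL, tL+mR), tL+tR).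
import Mathlib
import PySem

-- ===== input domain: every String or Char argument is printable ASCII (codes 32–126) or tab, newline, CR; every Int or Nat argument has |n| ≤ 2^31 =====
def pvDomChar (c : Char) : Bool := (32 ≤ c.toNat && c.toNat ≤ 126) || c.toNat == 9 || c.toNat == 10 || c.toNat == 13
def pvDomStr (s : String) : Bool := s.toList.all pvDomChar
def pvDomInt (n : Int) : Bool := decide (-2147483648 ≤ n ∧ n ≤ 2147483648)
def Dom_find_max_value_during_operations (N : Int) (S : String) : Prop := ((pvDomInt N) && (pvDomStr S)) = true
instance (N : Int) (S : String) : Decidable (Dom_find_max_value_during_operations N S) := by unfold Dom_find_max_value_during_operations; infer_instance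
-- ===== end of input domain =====

-- B replaces A's single running-sum/running-max scan by a divide-and-conquer split-in-half
-- recursion merging (floored max prefix, total) pairs (alternative algorithm, same result).

-- ===== PORT A =====
-- single pass, state (max_value, x)
def find_max_value_during_operations (N : Int) (S : String) : Int :=
  (S.toList.foldl
    (fun (st : Int × Int) (char : Char) =>
      let x := if char == 'I' then st.2 + 1 else st.2 - 1
      (if st.1 < x then x else st.1, x))
    (0, 0)).1

-- ===== PORT B =====
-- Source B's solve: divide and conquer on the character segment, returning
-- (floored max prefix sum, total sum)
def pvSolve : List Char → Int × Int
  | [] => (0, 0)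
  | [c] =>
    let d : Int := if c == 'I' then 1 else -1
    (max 0 d, d)
  | c1 :: c2 :: tl =>
    let seg := c1 :: c2 :: tl
    let mid := seg.length / 2
    let L := pvSolve (seg.take mid)
    let R := pvSolve (seg.drop mid)
    (max L.1 (L.2 + R.1), L.2 + R.2)
termination_by l => l.length
decreasing_by
  · simp; omega
  · simp; omega

def find_max_value_during_operations_alt (N : Int) (S : String) : Int :=
  (pvSolve S.toList).1

-- ===== PRECONDITION & SPEC =====
def Spec_find_max_value_during_operations (N : Int) (S : String) (out : Int) : Prop := out = find_max_value_during_operations_alt N S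
instance (N : Int) (S : String) (out : Int) : Decidable (Spec_find_max_value_during_operations N S out) := by unfold Spec_find_max_value_during_operations; infer_instance

-- ===== CLAIM =====
def Claim_equal_find_max_value_during_operations : Prop := ∀ (N : Int) (S : String), Dom_find_max_value_during_operations N S → Spec_find_max_value_during_operations N S (find_max_value_during_operations N S)

-- ===== LEMMAS AND PROOFS =====

-- proof-only spec functions: delta, total sum, and floored max prefix sum
def pvDelta (c : Char) : Int := if c == 'I' then 1 else -1

def pvT : List Char → Int
  | [] => 0
  | c :: tl => pvDelta c + pvT tl

def pvP : List Char → Int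
  | [] => 0
  | c :: tl => max 0 (pvDelta c + pvP tl)

theorem pvP_nonneg (l : List Char) : 0 ≤ pvP l := by
  cases l with
  | nil => simp [pvP]
  | cons c tl => simp [pvP]

theorem pvT_append (L R : List Char) : pvT (L ++ R) = pvT L + pvT R := by
  induction L with
  | nil => simp [pvT]
  | cons c tl ih => simp [pvT, ih]; ring

theorem pvP_append (L R : List Char) : pvP (L ++ R) = max (pvP L) (pvT L + pvP R) := by
  induction L with
  | nil => have := pvP_nonneg R; simp [pvP, pvT]; omega
  | cons c tl ih =>
    have := pvP_nonneg R
    simp only [List.cons_append, pvP, pvT, ih]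
    omega

-- B's recursion computes exactly (pvP, pvT)
theorem pvSolve_spec (l : List Char) : pvSolve l = (pvP l, pvT l) := by
  induction l using pvSolve.induct with
  | case1 => simp [pvSolve, pvP, pvT]
  | case2 c => simp [pvSolve, pvP, pvT, pvDelta]
  | case3 c1 c2 tl x1 x2 ihL ihR =>
    rw [pvSolve, ihL, ihR]
    have h : (c1 :: c2 :: tl) =
        (c1 :: c2 :: tl).take ((c1 :: c2 :: tl).length / 2) ++
        (c1 :: c2 :: tl).drop ((c1 :: c2 :: tl).length / 2) := by
      simp
    conv_rhs => rw [h]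
    rw [pvP_append, pvT_append]

-- named copy of A's step function (definitionally equal to the inline lambda)
def pvStepA (st : Int × Int) (char : Char) : Int × Int :=
  let x := if char == 'I' then st.2 + 1 else st.2 - 1
  (if st.1 < x then x else st.1, x)

-- A's fold from state (m, x) with x ≤ m yields max m (x + pvP l)
theorem pvFoldA (l : List Char) (m x : Int) (hx : x ≤ m) :
    (l.foldl pvStepA (m, x)).1 = max m (x + pvP l) := by
  induction l generalizing m x with
  | nil => simp [pvP]; omega
  | cons c tl ih =>
    have hP := pvP_nonneg tl
    simp only [List.foldl_cons, pvP]
    by_cases h : (c == 'I') = true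
    · have hd : pvDelta c = 1 := by simp [pvDelta, h]
      rw [show pvStepA (m, x) c = (if m < x + 1 then x + 1 else m, x + 1) by
        simp [pvStepA, h]]
      rw [ih _ _ (by split_ifs <;> omega), hd]
      split_ifs <;> omega
    · have hd : pvDelta c = -1 := by simp [pvDelta, h]
      rw [show pvStepA (m, x) c = (if m < x - 1 then x - 1 else m, x - 1) by
        simp only [pvStepA, if_neg h]]
      rw [ih _ _ (by split_ifs <;> omega), hd]
      split_ifs <;> omega

-- ===== VERDICT =====
theorem find_max_value_during_operations_spec : Claim_equal_find_max_value_during_operations := by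
  intro N S _
  show (S.toList.foldl pvStepA (0, 0)).1 = find_max_value_during_operations_alt N S
  unfold find_max_value_during_operations_alt
  rw [pvFoldA _ 0 0 le_rfl, pvSolve_spec]
  have := pvP_nonneg S.toList
  simp
  omega
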